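-- pv_equiv track=rewrite | github.com/zedstate/streamflow | backend/apps/stream/acestream_session_service.py | _ace_status_buckets
-- ===== SOURCE A (Python) =====
-- def _ace_status_buckets(monitor_items):
--     active_states = {"starting", "running", "stuck", "reconnecting"}
--     running = 0
--     stuck = 0
--     dead = 0
--
--     for item in monitor_items:
--         status = (item.get("status") or "").lower()
--         if status == "running":
--             running += 1
--         elif status == "stuck":
--             stuck += 1
--             dead += 1
--         elif status == "dead":
--             dead += 1
--
--     is_active = any((item.get("status") or "").lower() in active_states for item in monitor_items)
--     return running, stuck, dead, is_active
-- ===== SOURCE B (Python) =====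
-- def _ace_status_buckets(monitor_items):
--     # One pass builds a status frequency table; all four results are table lookups.
--     counts = {}
--     for item in monitor_items:
--         s = (item.get("status") or "").lower()
--         counts[s] = counts.get(s, 0) + 1
--     running = counts.get("running", 0)
--     stuck = counts.get("stuck", 0)
--     dead = stuck + counts.get("dead", 0)
--     is_active = any(counts.get(s, 0) > 0
--                     for s in ("starting", "running", "stuck", "reconnecting"))
--     return running, stuck, dead, is_active
-- ===== Notes on version B (the rewrite author's own statement) =====
-- stated objective: alternative
-- what changed: Replaces the branchy three-counter loop plus a separate any() scan with a single frequency-table-building pass; running/stuck/dead and is_active are then derived by table lookups (dead = stuck + dead-count, is_active checks the four active states' counts).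
import Mathlib
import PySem

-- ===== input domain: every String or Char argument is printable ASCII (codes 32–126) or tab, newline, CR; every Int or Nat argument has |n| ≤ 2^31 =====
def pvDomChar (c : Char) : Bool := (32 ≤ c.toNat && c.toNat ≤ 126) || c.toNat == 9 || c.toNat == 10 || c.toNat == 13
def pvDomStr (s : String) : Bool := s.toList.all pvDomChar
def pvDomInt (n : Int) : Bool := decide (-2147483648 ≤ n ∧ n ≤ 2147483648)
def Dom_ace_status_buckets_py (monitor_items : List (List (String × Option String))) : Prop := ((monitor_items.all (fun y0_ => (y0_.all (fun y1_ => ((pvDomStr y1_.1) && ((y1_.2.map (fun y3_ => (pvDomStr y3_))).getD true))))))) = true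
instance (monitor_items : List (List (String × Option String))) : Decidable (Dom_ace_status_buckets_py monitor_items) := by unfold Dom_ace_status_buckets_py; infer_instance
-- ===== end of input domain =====

-- B replaces A's branchy three-counter loop + separate any() scan by one frequency-table
-- pass followed by table lookups; same cost, different structure (objective: alternative).

-- (item.get("status") or "").lower() — shared by both Pythons verbatim
def pvStatusOf (item : List (String × Option String)) : String :=
  PySem.Str.lower ((((PySem.Dict.mk item).get? "status").getD none).getD "")

-- ===== PORT A =====
-- the Python set literal {"starting", "running", "stuck", "reconnecting"} (used for membership only)
def pvActiveStates : PySem.Set String :=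
  PySem.Set.ofList ["starting", "running", "stuck", "reconnecting"]

def ace_status_buckets_py (monitor_items : List (List (String × Option String))) : Int × Int × Int × Bool :=
  let st := monitor_items.foldl
    (fun acc item =>
      let status := pvStatusOf item
      if status = "running" then (acc.1 + 1, acc.2.1, acc.2.2)
      else if status = "stuck" then (acc.1, acc.2.1 + 1, acc.2.2 + 1)
      else if status = "dead" then (acc.1, acc.2.1, acc.2.2 + 1)
      else acc)
    ((0 : Int), (0 : Int), (0 : Int))
  let is_active := monitor_items.any (fun item => PySem.Set.contains pvActiveStates (pvStatusOf item))
  (st.1, st.2.1, st.2.2, is_active)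

-- ===== PORT B =====
def ace_status_buckets_py_alt (monitor_items : List (List (String × Option String))) : Int × Int × Int × Bool :=
  let counts := monitor_items.foldl
    (fun d item =>
      let s := pvStatusOf item
      d.insert s (d.getD s 0 + 1))
    (PySem.Dict.empty : PySem.Dict String Int)
  let running := counts.getD "running" 0
  let stuck := counts.getD "stuck" 0
  let dead := stuck + counts.getD "dead" 0
  let is_active := (["starting", "running", "stuck", "reconnecting"] : List String).any
    (fun s => counts.getD s 0 > 0)
  (running, stuck, dead, is_active)

-- ===== PRECONDITION & SPEC =====
def Spec_ace_status_buckets_py (monitor_items : List (List (String × Option String))) (out : Int × Int × Int × Bool) : Prop := out = ace_status_buckets_py_alt monitor_items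
instance (monitor_items : List (List (String × Option String))) (out : Int × Int × Int × Bool) : Decidable (Spec_ace_status_buckets_py monitor_items out) := by unfold Spec_ace_status_buckets_py; infer_instance

-- ===== CLAIM (what is proved, stated in full; the proofs are below) =====
def Claim_equal_ace_status_buckets_py : Prop := ∀ (monitor_items : List (List (String × Option String))), Dom_ace_status_buckets_py monitor_items → Spec_ace_status_buckets_py monitor_items (ace_status_buckets_py monitor_items)

-- ===== LEMMAS AND PROOFS =====

-- A's counting loop, as counts over the status list
theorem pv_fold_A (l : List (List (String × Option String))) (r s d : Int) :
    l.foldl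
      (fun acc item =>
        let status := pvStatusOf item
        if status = "running" then (acc.1 + 1, acc.2.1, acc.2.2)
        else if status = "stuck" then (acc.1, acc.2.1 + 1, acc.2.2 + 1)
        else if status = "dead" then (acc.1, acc.2.1, acc.2.2 + 1)
        else acc)
      (r, s, d)
    = (r + ((l.map pvStatusOf).count "running" : Int),
       s + ((l.map pvStatusOf).count "stuck" : Int),
       d + ((l.map pvStatusOf).count "stuck" : Int) + ((l.map pvStatusOf).count "dead" : Int)) := by
  induction l generalizing r s d with
  | nil => simp
  | cons hd tl ih =>
    simp only [List.foldl_cons, List.map_cons]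
    rw [ih]
    by_cases h1 : pvStatusOf hd = "running"
    · simp [h1]; omega
    · by_cases h2 : pvStatusOf hd = "stuck"
      · simp [h2]; omega
      · by_cases h3 : pvStatusOf hd = "dead"
        · simp [h3]; omega
        · simp [h1, h2, h3]

-- B's frequency table looked up at v is the count of v among the statuses
theorem pv_counts_B (l : List (List (String × Option String))) (v : String) :
    (l.foldl
      (fun d item =>
        let s := pvStatusOf item
        d.insert s (d.getD s 0 + 1))
      (PySem.Dict.empty : PySem.Dict String Int)).getD v 0
    = ((l.map pvStatusOf).count v : Int) := by
  have hfun : (fun (d : PySem.Dict String Int) item =>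
      let s := pvStatusOf item
      d.insert s (d.getD s 0 + 1))
      = (fun (d : PySem.Dict String Int) item => d.insert (pvStatusOf item) (d.getD (pvStatusOf item) 0 + 1)) := rfl
  rw [hfun, ← List.foldl_map (f := pvStatusOf) (g := fun (d : PySem.Dict String Int) s => d.insert s (d.getD s 0 + 1)),
    PySem.Dict.getD_foldl_insert_add_one]
  simp

-- the two any-scans agree: some item has an active status ↔ some active status has positive count
theorem pv_active_eq (l : List (List (String × Option String))) :
    l.any (fun item => PySem.Set.contains pvActiveStates (pvStatusOf item))
    = (["starting", "running", "stuck", "reconnecting"] : List String).any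
        (fun s => decide ((0 : Int) < ((l.map pvStatusOf).count s : Int))) := by
  rw [Bool.eq_iff_iff]
  simp only [List.any_eq_true, decide_eq_true_eq]
  constructor
  · rintro ⟨item, hitem, hmem⟩
    have hx : pvStatusOf item ∈ (["starting", "running", "stuck", "reconnecting"] : List String) := by
      simpa [pvActiveStates, PySem.Set.mem_ofList] using hmem
    refine ⟨pvStatusOf item, hx, ?_⟩
    have hm : pvStatusOf item ∈ l.map pvStatusOf := List.mem_map_of_mem hitem
    exact_mod_cast List.count_pos_iff.mpr hm
  · rintro ⟨s, hs, hpos⟩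
    have hm : s ∈ l.map pvStatusOf := List.count_pos_iff.mp (by exact_mod_cast hpos)
    obtain ⟨item, hitem, rfl⟩ := List.mem_map.mp hm
    refine ⟨item, hitem, ?_⟩
    simp [pvActiveStates, PySem.Set.mem_ofList, hs]

-- ===== VERDICT (by name: the statement is the Claim_ definition above) =====
theorem ace_status_buckets_py_spec : Claim_equal_ace_status_buckets_py := by
  intro l _
  unfold Spec_ace_status_buckets_py ace_status_buckets_py ace_status_buckets_py_alt
  simp only [pv_fold_A, pv_counts_B, pv_active_eq, gt_iff_lt]
  simp
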